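-- pv_equiv track=rewrite | github.com/AJK888/True-Sidereal-Birth-Chart-Calculator | natal_chart.py | calculate_name_numerology
-- ===== SOURCE A (Python) =====
-- def calculate_name_numerology(full_name: str) -> dict:
--     """Calculate Expression, Soul Urge, and Personality numbers from a full name."""
--     name_to_number = {
--         'A': 1, 'B': 2, 'C': 3, 'D': 4, 'E': 5, 'F': 6, 'G': 7, 'H': 8, 'I': 9,
--         'J': 1, 'K': 2, 'L': 3, 'M': 4, 'N': 5, 'O': 6, 'P': 7, 'Q': 8, 'R': 9,
--         'S': 1, 'T': 2, 'U': 3, 'V': 4, 'W': 5, 'X': 6, 'Y': 7, 'Z': 8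
--     }
--     vowels = {'A', 'E', 'I', 'O', 'U'}
--
--     def reduce_number(n):
--         while n > 9 and n not in [11, 22, 33]:
--             n = sum(int(d) for d in str(n))
--         return n
--
--     full_name_upper = full_name.upper().replace(' ', '')
--     expression_sum = sum(name_to_number.get(char, 0) for char in full_name_upper)
--     soul_urge_sum = sum(name_to_number.get(char, 0) for char in full_name_upper if char in vowels)
--     personality_sum = sum(name_to_number.get(char, 0) for char in full_name_upper if char not in vowels)
--
--     expression_number = reduce_number(expression_sum)
--     soul_urge_number = reduce_number(soul_urge_sum)
--     personality_number = reduce_number(personality_sum)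
--
--     return {"expression_number": expression_number, "soul_urge_number": soul_urge_number, "personality_number": personality_number}
-- ===== SOURCE B (Python) =====
-- def calculate_name_numerology(full_name: str) -> dict:
--     """Calculate Expression, Soul Urge, and Personality numbers from a full name."""
--
--     def digit_sum(n):
--         s = 0
--         while n > 0:
--             s += n % 10
--             n //= 10
--         return s
--
--     def reduce_number(n):
--         if n <= 9 or n == 11 or n == 22 or n == 33:
--             return n
--         return reduce_number(digit_sum(n))
--
--     expression_sum = 0
--     soul_urge_sum = 0
--     for ch in full_name.upper():
--         if 'A' <= ch <= 'Z':
--             value = (ord(ch) - ord('A')) % 9 + 1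
--             expression_sum += value
--             if ch in "AEIOU":
--                 soul_urge_sum += value
--     personality_sum = expression_sum - soul_urge_sum
--
--     return {"expression_number": reduce_number(expression_sum),
--             "soul_urge_number": reduce_number(soul_urge_sum),
--             "personality_number": reduce_number(personality_sum)}
-- ===== Notes on version B (the rewrite author's own statement) =====
-- stated objective: simpler
-- what changed: Replaces the 26-entry letter dict by the arithmetic formula (ord-65)%9+1, fuses A's three filtered scans into one accumulator pass deriving the personality sum as expression minus soul-urge, and replaces the string-conversion digit-sum reduction by recursive arithmetic divmod digit summing.
import Mathlib
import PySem

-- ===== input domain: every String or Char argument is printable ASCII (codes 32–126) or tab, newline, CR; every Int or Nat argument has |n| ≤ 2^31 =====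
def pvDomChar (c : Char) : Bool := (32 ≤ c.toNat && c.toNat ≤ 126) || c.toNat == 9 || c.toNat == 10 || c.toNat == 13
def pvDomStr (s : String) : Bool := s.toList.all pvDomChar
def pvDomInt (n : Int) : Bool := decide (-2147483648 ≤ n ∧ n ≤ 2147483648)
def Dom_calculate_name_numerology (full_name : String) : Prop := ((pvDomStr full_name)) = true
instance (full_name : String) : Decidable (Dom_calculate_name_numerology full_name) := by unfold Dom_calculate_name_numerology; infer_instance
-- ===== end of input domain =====

-- B replaces the 26-entry letter dict by the formula (ord-65)%9+1, fuses A's three filtered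
-- scans into one accumulator pass deriving the personality sum as expression - soul_urge,
-- and reduces by recursive arithmetic divmod digit-summing instead of A's while loop over
-- str(n) (objective: simpler).

-- helper used by A's reduce_number termination proof (cited by decreasing_by): digit sum of a Nat
def pvNatDigitSum (n : Nat) : Nat :=
  if h : n = 0 then 0 else n % 10 + pvNatDigitSum (n / 10)
decreasing_by exact Nat.div_lt_self (Nat.pos_of_ne_zero h) (by omega)

-- sum(int(d) for d in str(n)) — the body of A's reduce_number while loop; for the n > 9 reached
-- there every d is a decimal digit, so ofChars? is some and the .getD 0 default is never used
def pvDigitSum (n : Int) : Int :=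
  ((PySem.Int.toChars n).map (fun d => (PySem.Int.ofChars? [d]).getD 0)).sum

theorem pvCharInt_digitChar (d : Nat) (h : d < 10) :
    (PySem.Int.ofChars? [Nat.digitChar d]).getD 0 = (d : Int) := by
  interval_cases d <;> decide

theorem pvGoSum (fuel : Nat) : ∀ (n : Nat) (ds : List Char), n < fuel →
    ((Nat.toDigitsCore 10 fuel n ds).map (fun d => (PySem.Int.ofChars? [d]).getD 0)).sum
      = (pvNatDigitSum n : Int) + ((ds.map (fun d => (PySem.Int.ofChars? [d]).getD 0)).sum) := by
  induction fuel with
  | zero => intro n ds h; omega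
  | succ f ih =>
    intro n ds h
    rw [Nat.toDigitsCore]
    by_cases h0 : n / 10 = 0
    · rw [if_pos h0]
      simp only [List.map_cons, List.sum_cons, pvCharInt_digitChar (n % 10) (by omega)]
      rcases Nat.eq_zero_or_pos n with hz | hz
      · subst hz; simp [pvNatDigitSum]
      · rw [pvNatDigitSum, dif_neg (by omega), h0]
        simp [pvNatDigitSum]
    · rw [if_neg h0]
      have hlt : n / 10 < f := by
        have := Nat.div_lt_self (by omega : 0 < n) (by omega : 1 < 10)
        omega
      rw [ih (n / 10) _ hlt]
      have hz : ¬ n = 0 := by omega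
      have hrec : (pvNatDigitSum n : Int) = ((n % 10 : Nat) : Int) + (pvNatDigitSum (n / 10) : Int) := by
        rw [pvNatDigitSum, dif_neg hz]; push_cast; ring
      rw [hrec]
      simp only [List.map_cons, List.sum_cons, pvCharInt_digitChar (n % 10) (by omega)]
      ring

theorem pvDigitSum_eq (n : Int) (h : 0 ≤ n) : pvDigitSum n = (pvNatDigitSum n.toNat : Int) := by
  unfold pvDigitSum PySem.Int.toChars
  rw [if_neg (by omega)]
  unfold Nat.toDigits
  rw [pvGoSum (n.toNat + 1) n.toNat [] (by omega)]
  simp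

theorem pvNatDigitSum_le (n : Nat) : pvNatDigitSum n ≤ n := by
  induction n using Nat.strong_induction_on with
  | _ n ih =>
    rw [pvNatDigitSum]
    split_ifs with hz
    · omega
    · have := ih (n / 10) (Nat.div_lt_self (by omega) (by omega))
      omega

theorem pvNatDigitSum_lt (n : Nat) (h : 10 ≤ n) : pvNatDigitSum n < n := by
  rw [pvNatDigitSum, dif_neg (by omega)]
  have := pvNatDigitSum_le (n / 10)
  omega

-- ===== PORT A =====
-- A's reduce_number: while n > 9 and n not in [11,22,33]: n = sum(int(d) for d in str(n))
def reduce_number (n : Int) : Int :=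
  if 9 < n ∧ ¬(n = 11 ∨ n = 22 ∨ n = 33) then reduce_number (pvDigitSum n) else n
termination_by n.toNat
decreasing_by
  rename_i h
  rw [pvDigitSum_eq n (by omega)]
  rw [Int.toNat_natCast]
  exact Nat.lt_of_lt_of_le (pvNatDigitSum_lt n.toNat (by omega)) (by omega)

def calculate_name_numerology (full_name : String) : List (String × Int) :=
  let name_to_number : PySem.Dict Char Int := ⟨[('A',1),('B',2),('C',3),('D',4),('E',5),('F',6),('G',7),('H',8),('I',9),
    ('J',1),('K',2),('L',3),('M',4),('N',5),('O',6),('P',7),('Q',8),('R',9),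
    ('S',1),('T',2),('U',3),('V',4),('W',5),('X',6),('Y',7),('Z',8)]⟩
  let vowels : PySem.Set Char := PySem.Set.ofList ['A','E','I','O','U']
  let full_name_upper := PySem.Str.replace (PySem.Str.upper full_name) " " ""
  let cs := full_name_upper.toList
  let expression_sum := (cs.map (fun c => name_to_number.getD c 0)).sum
  let soul_urge_sum := ((cs.filter (fun c => vowels.contains c)).map (fun c => name_to_number.getD c 0)).sum
  let personality_sum := ((cs.filter (fun c => !(vowels.contains c))).map (fun c => name_to_number.getD c 0)).sum
  [("expression_number", reduce_number expression_sum),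
   ("soul_urge_number", reduce_number soul_urge_sum),
   ("personality_number", reduce_number personality_sum)]

-- ===== PORT B =====
-- B's digit_sum: s = 0; while n > 0: s += n % 10; n //= 10; return s
def pv_digit_sum_go (n s : Int) : Int :=
  if 0 < n then pv_digit_sum_go (PySem.Int.floordiv n 10) (s + PySem.Int.mod n 10) else s
termination_by n.toNat
decreasing_by
  rename_i h
  rw [PySem.Int.floordiv_eq_ediv_of_pos (by omega)]
  omega

def pv_digit_sum (n : Int) : Int := pv_digit_sum_go n 0

-- cited by pv_reduce's decreasing_by: the loop computes s + digit-sum of n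
theorem pv_digit_sum_go_eq_aux : ∀ (k : Nat) (n s : Int), 0 ≤ n → n.toNat = k →
    pv_digit_sum_go n s = s + (pvNatDigitSum n.toNat : Int) := by
  intro k
  induction k using Nat.strong_induction_on with
  | _ k ih =>
    intro n s h hk
    rw [pv_digit_sum_go]
    by_cases hp : 0 < n
    · rw [if_pos hp]
      have hd : PySem.Int.floordiv n 10 = n / 10 :=
        PySem.Int.floordiv_eq_ediv_of_pos (by omega)
      have hm : PySem.Int.mod n 10 = n % 10 :=
        PySem.Int.mod_eq_emod_of_pos (by omega)
      rw [ih (n / 10).toNat (by omega) (PySem.Int.floordiv n 10) _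
          (by rw [hd]; omega) (by rw [hd])]
      rw [hd, hm]
      rw [show pvNatDigitSum n.toNat = n.toNat % 10 + pvNatDigitSum (n.toNat / 10) from by
        rw [pvNatDigitSum]; rw [dif_neg (by omega)]]
      have h2 : (n / 10).toNat = n.toNat / 10 := by omega
      rw [h2]
      push_cast
      omega
    · rw [if_neg hp]
      have hz : n.toNat = 0 := by omega
      rw [hz]
      simp [pvNatDigitSum]

theorem pv_digit_sum_go_eq (n s : Int) (h : 0 ≤ n) :
    pv_digit_sum_go n s = s + (pvNatDigitSum n.toNat : Int) :=
  pv_digit_sum_go_eq_aux n.toNat n s h rfl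

-- B's reduce_number: early return on n ≤ 9 or a master number, else recurse on digit_sum(n)
def pv_reduce (n : Int) : Int :=
  if n ≤ 9 ∨ n = 11 ∨ n = 22 ∨ n = 33 then n
  else pv_reduce (pv_digit_sum n)
termination_by n.toNat
decreasing_by
  rename_i h
  push_neg at h
  have hs : pv_digit_sum n = (pvNatDigitSum n.toNat : Int) := by
    rw [pv_digit_sum, pv_digit_sum_go_eq n 0 (by omega)]; ring
  rw [hs, Int.toNat_natCast]
  exact Nat.lt_of_lt_of_le (pvNatDigitSum_lt n.toNat (by omega)) (by omega)

def calculate_name_numerology_alt (full_name : String) : List (String × Int) :=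
  let vowels := "AEIOU"
  let p := (PySem.Str.upper full_name).toList.foldl
    (fun (p : Int × Int) ch =>
      if 'A' ≤ ch ∧ ch ≤ 'Z' then
        let value : Int := PySem.Int.mod ((ch.toNat : Int) - 65) 9 + 1
        (p.1 + value, if vowels.toList.contains ch then p.2 + value else p.2)
      else p) ((0 : Int), (0 : Int))
  [("expression_number", pv_reduce p.1),
   ("soul_urge_number", pv_reduce p.2),
   ("personality_number", pv_reduce (p.1 - p.2))]

-- ===== PRECONDITION & SPEC =====
def Spec_calculate_name_numerology (full_name : String) (out : List (String × Int)) : Prop := out = calculate_name_numerology_alt full_name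
instance (full_name : String) (out : List (String × Int)) : Decidable (Spec_calculate_name_numerology full_name out) := by unfold Spec_calculate_name_numerology; infer_instance

-- ===== CLAIM (what is proved, stated in full; the proofs are below) =====
def Claim_equal_calculate_name_numerology : Prop := ∀ (full_name : String), Dom_calculate_name_numerology full_name → Spec_calculate_name_numerology full_name (calculate_name_numerology full_name)

-- ===== LEMMAS AND PROOFS =====

theorem pv_reduce_eq_reduce_number (n : Int) : pv_reduce n = reduce_number n := by
  by_cases hn : 0 ≤ n
  · generalize hk : n.toNat = k
    induction k using Nat.strong_induction_on generalizing n with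
    | _ k ih =>
      rw [pv_reduce, reduce_number]
      by_cases hc : n ≤ 9 ∨ n = 11 ∨ n = 22 ∨ n = 33
      · rw [if_pos hc, if_neg (by omega)]
      · rw [if_neg hc, if_pos (by omega)]
        push_neg at hc
        have hds : pv_digit_sum n = pvDigitSum n := by
          rw [pv_digit_sum, pv_digit_sum_go_eq n 0 (by omega), pvDigitSum_eq n (by omega)]
          ring
        rw [hds]
        have h0 : (0:Int) ≤ pvDigitSum n := by
          rw [pvDigitSum_eq n (by omega)]; positivity
        exact ih (pvDigitSum n).toNat (by
          rw [pvDigitSum_eq n (by omega), Int.toNat_natCast]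
          exact Nat.lt_of_lt_of_le (pvNatDigitSum_lt n.toNat (by omega)) (by omega))
          (pvDigitSum n) h0 rfl
  · rw [pv_reduce, reduce_number, if_pos (by omega : n ≤ 9 ∨ n = 11 ∨ n = 22 ∨ n = 33),
      if_neg (by omega)]

-- B's per-character value (0 on non-letters), and the vowel test
def pvG (c : Char) : Int := if 'A' ≤ c ∧ c ≤ 'Z' then PySem.Int.mod ((c.toNat : Int) - 65) 9 + 1 else 0
def pvVb (c : Char) : Bool := "AEIOU".toList.contains c

theorem pvDict_eq_G (c : Char) :
    (PySem.Dict.getD (⟨[('A',1),('B',2),('C',3),('D',4),('E',5),('F',6),('G',7),('H',8),('I',9),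
      ('J',1),('K',2),('L',3),('M',4),('N',5),('O',6),('P',7),('Q',8),('R',9),
      ('S',1),('T',2),('U',3),('V',4),('W',5),('X',6),('Y',7),('Z',8)]⟩ : PySem.Dict Char Int) c 0)
      = pvG c := by
  by_cases h : 65 ≤ c.toNat ∧ c.toNat ≤ 90
  · have h26 : c.toNat = 65 ∨ c.toNat = 66 ∨ c.toNat = 67 ∨ c.toNat = 68 ∨ c.toNat = 69 ∨
      c.toNat = 70 ∨ c.toNat = 71 ∨ c.toNat = 72 ∨ c.toNat = 73 ∨ c.toNat = 74 ∨
      c.toNat = 75 ∨ c.toNat = 76 ∨ c.toNat = 77 ∨ c.toNat = 78 ∨ c.toNat = 79 ∨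
      c.toNat = 80 ∨ c.toNat = 81 ∨ c.toNat = 82 ∨ c.toNat = 83 ∨ c.toNat = 84 ∨
      c.toNat = 85 ∨ c.toNat = 86 ∨ c.toNat = 87 ∨ c.toNat = 88 ∨ c.toNat = 89 ∨
      c.toNat = 90 := by omega
    rcases h26 with h|h|h|h|h|h|h|h|h|h|h|h|h|h|h|h|h|h|h|h|h|h|h|h|h|h <;>
      (rw [← Char.ofNat_toNat c, h]; decide)
  · have hz : pvG c = 0 := by
      unfold pvG
      rw [if_neg]
      intro ⟨h1, h2⟩
      exact h ⟨h1, h2⟩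
    rw [hz]
    unfold PySem.Dict.getD PySem.Dict.get?
    rw [List.find?_eq_none.mpr]
    · rfl
    · intro p hp
      fin_cases hp <;>
        (simp only [beq_iff_eq]; intro hc; rw [← hc] at h; exact h (by decide))

theorem pvFold_eq (cs : List Char) : ∀ (e s : Int),
    cs.foldl (fun (p : Int × Int) ch =>
      if 'A' ≤ ch ∧ ch ≤ 'Z' then
        (p.1 + (PySem.Int.mod ((ch.toNat : Int) - 65) 9 + 1),
         if "AEIOU".toList.contains ch then p.2 + (PySem.Int.mod ((ch.toNat : Int) - 65) 9 + 1) else p.2)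
      else p) (e, s)
    = (e + (cs.map pvG).sum, s + ((cs.filter pvVb).map pvG).sum) := by
  induction cs with
  | nil => intro e s; simp
  | cons c t ih =>
    intro e s
    simp only [List.foldl_cons, List.map_cons, List.sum_cons, List.filter_cons]
    by_cases hL : 'A' ≤ c ∧ c ≤ 'Z'
    · rw [if_pos hL]
      by_cases hv : pvVb c
      · have hvc : ("AEIOU".toList.contains c) = true := hv
        rw [if_pos hvc, ih]
        simp only [hv, if_pos]
        simp only [pvG, if_pos hL, List.map_cons, List.sum_cons]
        simp only [Prod.mk.injEq]; constructor <;> ring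
      · have hvc : ("AEIOU".toList.contains c) = false := by
          simpa [pvVb] using hv
        rw [hvc]
        simp only [Bool.false_eq_true, if_false, ih]
        have hb : pvVb c = false := by simpa [pvVb] using hv
        simp only [hb, Bool.false_eq_true, if_false]
        simp only [pvG, if_pos hL, Prod.mk.injEq]
        exact ⟨by ring, trivial⟩
    · rw [if_neg hL, ih]
      have hg : pvG c = 0 := by simp [pvG, hL]
      by_cases hv : pvVb c
      · simp only [hv, if_pos, List.map_cons, List.sum_cons, hg]
        simp only [Prod.mk.injEq]; constructor <;> ring
      · have : pvVb c = false := by simpa using hv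
        simp [this, hg]

-- str.replace(s, ' ', '') removes exactly the spaces
theorem pvReplaceGo (fuel : Nat) : ∀ (l acc : List Char), l.length ≤ fuel →
    PySem.Chars.replace.go [' '] [] fuel l acc = acc.reverse ++ l.filter (fun c => !(c == ' ')) := by
  induction fuel with
  | zero =>
    intro l acc h
    have : l = [] := List.eq_nil_of_length_eq_zero (by omega)
    subst this
    simp [PySem.Chars.replace.go]
  | succ f ih =>
    intro l acc h
    cases l with
    | nil => simp [PySem.Chars.replace.go]
    | cons c t =>
      rw [PySem.Chars.replace.go]
      by_cases hc : c = ' '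
      · subst hc
        have hpre : ([' '].isPrefixOf (' ' :: t)) = true := by simp [List.isPrefixOf]
        rw [if_pos hpre]
        simp only [List.length_cons] at h
        rw [ih _ _ (by simpa using Nat.le_of_succ_le_succ h)]
        simp
      · rw [if_neg (by simp [List.isPrefixOf]; exact fun hh => hc hh.symm)]
        simp only [List.length_cons] at h
        rw [ih _ _ (by omega)]
        simp [hc]

theorem pvReplace_eq (s : List Char) :
    PySem.Chars.replace s [' '] [] = s.filter (fun c => !(c == ' ')) := by
  rw [PySem.Chars.replace]
  rw [if_neg (by decide)]
  rw [pvReplaceGo s.length s [] (le_refl _)]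
  simp

theorem pvSum_filter_space (cs : List Char) :
    ((cs.filter (fun c => !(c == ' '))).map pvG).sum = (cs.map pvG).sum := by
  induction cs with
  | nil => simp
  | cons c t ih =>
    by_cases hc : c = ' '
    · subst hc; simp [pvG, ih]
    · simp [hc, ih]

theorem pvFilter_vowel_space (cs : List Char) :
    (cs.filter (fun c => !(c == ' '))).filter pvVb = cs.filter pvVb := by
  induction cs with
  | nil => simp
  | cons c t ih =>
    by_cases hc : c = ' '
    · subst hc
      simp [ih, pvVb]
    · simp [List.filter_cons, hc, ih]

theorem pvSum_nonvowel (cs : List Char) :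
    ((cs.filter (fun c => !(pvVb c))).map pvG).sum
      = (cs.map pvG).sum - ((cs.filter pvVb).map pvG).sum := by
  induction cs with
  | nil => simp
  | cons c t ih =>
    by_cases hv : pvVb c
    · simp [hv, ih]
    · simp [hv, ih]; ring

theorem pvSetVowels : (PySem.Set.ofList ['A','E','I','O','U'] : List Char) = "AEIOU".toList := by decide

-- ===== VERDICT (by name: the statement is the Claim_ definition above) =====
theorem calculate_name_numerology_spec : Claim_equal_calculate_name_numerology := by
  intro full_name _
  unfold Spec_calculate_name_numerology
  unfold calculate_name_numerology calculate_name_numerology_alt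
  simp only [pvSetVowels, pv_reduce_eq_reduce_number]
  have hvb : ∀ c, PySem.Set.contains "AEIOU".toList c = pvVb c := fun _ => rfl
  simp only [hvb]
  set cs : List Char := (PySem.Str.upper full_name).toList with hcs
  have hA : (PySem.Str.replace (PySem.Str.upper full_name) " " "").toList
      = cs.filter (fun c => !(c == ' ')) := by
    simp [PySem.Str.replace, pvReplace_eq, hcs, PySem.Str.upper]
  rw [hA]
  set csf : List Char := cs.filter (fun c => !(c == ' ')) with hcsf
  have hmap : ∀ l : List Char, l.map (fun c => (PySem.Dict.getD (⟨[('A',1),('B',2),('C',3),('D',4),('E',5),('F',6),('G',7),('H',8),('I',9),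
      ('J',1),('K',2),('L',3),('M',4),('N',5),('O',6),('P',7),('Q',8),('R',9),
      ('S',1),('T',2),('U',3),('V',4),('W',5),('X',6),('Y',7),('Z',8)]⟩ : PySem.Dict Char Int) c 0))
      = l.map pvG := by
    intro l
    exact List.map_congr_left (fun c _ => pvDict_eq_G c)
  rw [hmap, hmap, hmap]
  rw [pvFold_eq cs 0 0]
  rw [hcsf, pvSum_filter_space, pvFilter_vowel_space]
  have hpers : ((csf.filter (fun c => !(pvVb c))).map pvG).sum
      = (csf.map pvG).sum - ((csf.filter pvVb).map pvG).sum := pvSum_nonvowel csf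
  rw [hcsf] at hpers
  rw [pvSum_filter_space, pvFilter_vowel_space] at hpers
  rw [hpers]
  simp
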